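-- pv_equiv track=rewrite | github.com/cac231/python-projects | jogo_tetrico/tetrico.py | verificar_colisao_parede
-- ===== SOURCE A (Python) =====
-- COLUNAS = 10
--
-- def verificar_colisao_parede(formato, pos, dx=0):
--     for i_linha, e_linha in enumerate(formato):
--         for i_coluna, _ in enumerate(e_linha):
--             if formato[i_linha][i_coluna] == 1:
--                 n_col = pos[0] + i_coluna + dx
--
--                 if n_col < 0:  # parede da esquerda
--                     return True
--
--                 if n_col >= COLUNAS: # parede da direita
--                     return True
--     return False
-- ===== SOURCE B (Python) =====
-- COLUNAS = 10
--
-- def verificar_colisao_parede(formato, pos, dx=0):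
--     # Build a bitmask of the shape's occupied columns, then answer both wall
--     # tests with two bit operations on the mask.
--     mask = 0
--     for row in formato:
--         for j, v in enumerate(row):
--             if v == 1:
--                 mask |= 1 << j
--     if mask == 0:
--         return False
--     off = pos[0] + dx
--     nbits = mask.bit_length()
--     # left wall: some occupied column j has j + off < 0, i.e. a bit below -off
--     esquerda = off < 0 and mask & ((1 << min(-off, nbits)) - 1) != 0
--     # right wall: some occupied column j has j + off >= COLUNAS
--     direita = mask >> min(max(COLUNAS - off, 0), nbits) != 0
--     return esquerda or direita
-- ===== Notes on version B (the rewrite author's own statement) =====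
-- stated objective: alternative
-- what changed: B condenses the grid into a single bitmask of occupied columns (OR of 1<<j over filled cells) and decides both wall collisions with two bit operations on that mask (low-bits mask for the left wall, right-shift for the right wall), instead of A's per-cell bounds test with early returns.
import Mathlib
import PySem

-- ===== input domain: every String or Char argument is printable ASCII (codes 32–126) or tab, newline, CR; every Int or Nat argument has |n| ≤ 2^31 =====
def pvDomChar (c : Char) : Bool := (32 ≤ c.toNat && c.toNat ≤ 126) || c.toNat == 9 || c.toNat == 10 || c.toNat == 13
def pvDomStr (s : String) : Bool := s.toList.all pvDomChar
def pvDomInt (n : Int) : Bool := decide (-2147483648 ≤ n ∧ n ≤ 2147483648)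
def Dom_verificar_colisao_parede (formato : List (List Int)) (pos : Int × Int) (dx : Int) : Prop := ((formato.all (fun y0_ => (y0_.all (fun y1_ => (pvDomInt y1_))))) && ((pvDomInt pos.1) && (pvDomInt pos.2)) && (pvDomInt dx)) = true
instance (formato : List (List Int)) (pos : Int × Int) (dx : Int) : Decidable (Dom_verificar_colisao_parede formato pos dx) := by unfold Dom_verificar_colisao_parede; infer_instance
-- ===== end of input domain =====

-- B condenses the grid into a bitmask of occupied columns and decides both wall
-- collisions with two bit operations on that mask, instead of A's per-cell
-- bounds test with early returns; same O(n) cost (objective: alternative).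

-- ===== PORT A =====
-- inner loop: for i_coluna, _ in enumerate(e_linha), early return on a filled out-of-range cell
def pvACells (p0 dx : Int) : List Int → Nat → Bool
  | [], _ => false
  | v :: rest, j =>
    if v == 1 then
      let n_col := p0 + (j : Int) + dx
      if n_col < 0 then true
      else if n_col ≥ 10 then true
      else pvACells p0 dx rest (j + 1)
    else pvACells p0 dx rest (j + 1)

-- outer loop over rows
def pvARows (p0 dx : Int) : List (List Int) → Bool
  | [] => false
  | row :: rows => if pvACells p0 dx row 0 then true else pvARows p0 dx rows

def verificar_colisao_parede (formato : List (List Int)) (pos : Int × Int) (dx : Int) : Bool :=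
  pvARows pos.1 dx formato

-- ===== PORT B =====
-- inner loop of the mask build: mask |= 1 << j for each filled cell of one row
def pvMaskRow : List Int → Nat → Nat → Nat
  | [], _, mask => mask
  | v :: rest, j, mask => pvMaskRow rest (j + 1) (if v == 1 then mask ||| (1 <<< j) else mask)

-- outer loop of the mask build over all rows
def pvMaskGrid : List (List Int) → Nat → Nat
  | [], mask => mask
  | row :: rows, mask => pvMaskGrid rows (pvMaskRow row 0 mask)

def verificar_colisao_parede_alt (formato : List (List Int)) (pos : Int × Int) (dx : Int) : Bool :=
  let mask := pvMaskGrid formato 0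
  if mask == 0 then false
  else
    let off := pos.1 + dx
    let nbits := Nat.size mask          -- mask.bit_length()
    let esquerda := decide (off < 0) && (mask &&& ((1 <<< min (-off).toNat nbits) - 1) != 0)
    let direita := (mask >>> min (max (10 - off) 0).toNat nbits) != 0
    esquerda || direita

-- ===== PRECONDITION & SPEC =====
def Spec_verificar_colisao_parede (formato : List (List Int)) (pos : Int × Int) (dx : Int) (out : Bool) : Prop := out = verificar_colisao_parede_alt formato pos dx
instance (formato : List (List Int)) (pos : Int × Int) (dx : Int) (out : Bool) : Decidable (Spec_verificar_colisao_parede formato pos dx out) := by unfold Spec_verificar_colisao_parede; infer_instance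

-- ===== CLAIM (what is proved, stated in full; the proofs are below) =====
def Claim_equal_verificar_colisao_parede : Prop := ∀ (formato : List (List Int)) (pos : Int × Int) (dx : Int), Dom_verificar_colisao_parede formato pos dx → Spec_verificar_colisao_parede formato pos dx (verificar_colisao_parede formato pos dx)

-- ===== LEMMAS AND PROOFS =====

-- does `row`, whose first cell has absolute column index j, have a 1 at absolute column i?
def pvRowFilled : List Int → Nat → Nat → Bool
  | [], _, _ => false
  | v :: rest, j, i => (v == 1 && j == i) || pvRowFilled rest (j + 1) i

def pvGridFilled (rows : List (List Int)) (i : Nat) : Bool :=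
  rows.any (fun row => pvRowFilled row 0 i)

theorem pvACells_iff (p0 dx : Int) (row : List Int) (j : Nat) :
    pvACells p0 dx row j = true ↔
      ∃ i, pvRowFilled row j i = true ∧ (p0 + (i : Int) + dx < 0 ∨ p0 + (i : Int) + dx ≥ 10) := by
  induction row generalizing j with
  | nil => simp [pvACells, pvRowFilled]
  | cons v rest ih =>
    by_cases hv : v == 1
    · simp only [pvACells, pvRowFilled, hv, if_true, Bool.true_and]
      by_cases h0 : p0 + (j : Int) + dx < 0
      · simp only [h0, if_true, true_iff]
        exact ⟨j, by simp, Or.inl h0⟩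
      · by_cases h1 : p0 + (j : Int) + dx ≥ 10
        · simp only [h0, h1, if_false, if_true, true_iff]
          exact ⟨j, by simp, Or.inr h1⟩
        · simp only [h0, h1, if_false, ih]
          constructor
          · rintro ⟨i, hf, hb⟩; exact ⟨i, by simp [hf], hb⟩
          · rintro ⟨i, hf, hb⟩
            rcases Bool.or_eq_true_iff.mp hf with h | h
            · have : j = i := by simpa using h
              subst this; omega
            · exact ⟨i, h, hb⟩
    · simp only [pvACells, pvRowFilled, hv, Bool.false_and, Bool.false_or]
      simp only [Bool.false_eq_true, if_false, ih]

theorem pvARows_iff (p0 dx : Int) (rows : List (List Int)) :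
    pvARows p0 dx rows = true ↔
      ∃ i, pvGridFilled rows i = true ∧ (p0 + (i : Int) + dx < 0 ∨ p0 + (i : Int) + dx ≥ 10) := by
  induction rows with
  | nil => simp [pvARows, pvGridFilled]
  | cons row rest ih =>
    simp only [pvARows, pvGridFilled, List.any_cons]
    by_cases h : pvACells p0 dx row 0 = true
    · simp only [h, if_true, true_iff]
      obtain ⟨i, hf, hb⟩ := (pvACells_iff p0 dx row 0).mp h
      exact ⟨i, by simp [hf], hb⟩
    · rw [Bool.not_eq_true] at h
      simp only [h, Bool.false_eq_true, if_false]
      rw [ih]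
      constructor
      · rintro ⟨i, hf, hb⟩; exact ⟨i, by simp [pvGridFilled] at hf ⊢; exact Or.inr hf, hb⟩
      · rintro ⟨i, hf, hb⟩
        rcases Bool.or_eq_true_iff.mp hf with hrow | hrest
        · exact absurd ((pvACells_iff p0 dx row 0).mpr ⟨i, hrow, hb⟩) (by simp [h])
        · exact ⟨i, by simp [pvGridFilled] at hrest ⊢; exact hrest, hb⟩

theorem pvMaskRow_testBit (row : List Int) (j mask : Nat) (i : Nat) :
    (pvMaskRow row j mask).testBit i = (mask.testBit i || pvRowFilled row j i) := by
  induction row generalizing j mask with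
  | nil => simp [pvMaskRow, pvRowFilled]
  | cons v rest ih =>
    simp only [pvMaskRow, pvRowFilled, ih]
    by_cases hv : v == 1
    · simp only [hv, if_true, Nat.testBit_or, Bool.true_and]
      have hone : ((1 : Nat) <<< j).testBit i = (j == i) := by
        rw [Nat.one_shiftLeft, Nat.testBit_two_pow]
        by_cases hij : j = i <;> simp [hij]
      rw [hone, Bool.or_assoc]
    · simp [hv]

theorem pvMaskGrid_testBit (rows : List (List Int)) (mask : Nat) (i : Nat) :
    (pvMaskGrid rows mask).testBit i = (mask.testBit i || pvGridFilled rows i) := by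
  induction rows generalizing mask with
  | nil => simp [pvMaskGrid, pvGridFilled]
  | cons row rest ih =>
    simp only [pvMaskGrid, pvGridFilled, List.any_cons, ih, pvMaskRow_testBit]
    rw [Bool.or_assoc]

-- a natural number is nonzero iff some bit is set
theorem pvNeZero_iff_testBit (n : Nat) : n ≠ 0 ↔ ∃ i, n.testBit i = true := by
  constructor
  · intro h
    by_contra hc
    push Not at hc
    exact h (Nat.eq_of_testBit_eq (fun i => by simp [Nat.zero_testBit]; exact Bool.eq_false_iff.mpr (hc i)))
  · rintro ⟨i, hi⟩ h0
    subst h0; simp [Nat.zero_testBit] at hi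

theorem pvTestBit_lt_size (n i : Nat) (h : n.testBit i = true) : i < Nat.size n :=
  Nat.lt_size.mpr (Nat.ge_two_pow_of_testBit h)

-- low-bits test: mask &&& ((1 <<< s) - 1) ≠ 0 iff a bit below s is set
theorem pvLowBits_iff (mask s : Nat) :
    (mask &&& ((1 <<< s) - 1) ≠ 0) ↔ ∃ i, i < s ∧ mask.testBit i = true := by
  rw [pvNeZero_iff_testBit]
  constructor
  · rintro ⟨i, hi⟩
    rw [Nat.testBit_and, Nat.one_shiftLeft, Nat.testBit_two_pow_sub_one] at hi
    simp only [Bool.and_eq_true, decide_eq_true_eq] at hi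
    exact ⟨i, hi.2, hi.1⟩
  · rintro ⟨i, hlt, hb⟩
    refine ⟨i, ?_⟩
    rw [Nat.testBit_and, Nat.one_shiftLeft, Nat.testBit_two_pow_sub_one]
    simp [hb, hlt]

-- shift-right test: mask >>> t ≠ 0 iff a bit at or above t is set
theorem pvHighBits_iff (mask t : Nat) :
    (mask >>> t ≠ 0) ↔ ∃ i, t ≤ i ∧ mask.testBit i = true := by
  rw [pvNeZero_iff_testBit]
  constructor
  · rintro ⟨i, hi⟩
    rw [Nat.testBit_shiftRight] at hi
    exact ⟨t + i, Nat.le_add_right _ _, hi⟩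
  · rintro ⟨i, hle, hb⟩
    refine ⟨i - t, ?_⟩
    rw [Nat.testBit_shiftRight]
    have : t + (i - t) = i := by omega
    rw [this]; exact hb

theorem pvAlt_iff (formato : List (List Int)) (pos : Int × Int) (dx : Int) :
    verificar_colisao_parede_alt formato pos dx = true ↔
      ∃ i, pvGridFilled formato i = true ∧
        (pos.1 + (i : Int) + dx < 0 ∨ pos.1 + (i : Int) + dx ≥ 10) := by
  unfold verificar_colisao_parede_alt
  set mask := pvMaskGrid formato 0 with hmaskdef
  have hbit : ∀ i, mask.testBit i = pvGridFilled formato i := by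
    intro i; rw [hmaskdef, pvMaskGrid_testBit]; simp [Nat.zero_testBit]
  by_cases h0 : mask = 0
  · simp only [h0, beq_self_eq_true, if_true, Bool.false_eq_true, false_iff]
    rintro ⟨i, hf, _⟩
    have := hbit i
    rw [h0, Nat.zero_testBit] at this
    rw [hf] at this; exact Bool.false_ne_true this
  · have h0' : (mask == 0) = false := by simp [h0]
    simp only [h0', Bool.false_eq_true, if_false]
    set off := pos.1 + dx with hoff
    set nbits := Nat.size mask with hnb
    have hsize : ∀ i, mask.testBit i = true → i < nbits := fun i hi => pvTestBit_lt_size mask i hi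
    constructor
    · intro h
      rcases Bool.or_eq_true_iff.mp h with hl | hr
      · -- left wall fired
        simp only [Bool.and_eq_true, decide_eq_true_eq, bne_iff_ne, ne_eq] at hl
        obtain ⟨hneg, hnz⟩ := hl
        obtain ⟨i, hlt, hb⟩ := (pvLowBits_iff mask _).mp hnz
        refine ⟨i, (hbit i) ▸ hb, Or.inl ?_⟩
        have : i < (-off).toNat := lt_of_lt_of_le hlt (min_le_left _ _)
        omega
      · -- right wall fired
        simp only [bne_iff_ne, ne_eq] at hr
        obtain ⟨i, hle, hb⟩ := (pvHighBits_iff mask _).mp hr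
        refine ⟨i, (hbit i) ▸ hb, Or.inr ?_⟩
        set b := (max (10 - off) 0).toNat with hbdef
        by_cases hbn : b ≤ nbits
        · have : min b nbits = b := min_eq_left hbn
          rw [this] at hle; omega
        · -- t = nbits, but every set bit is < nbits: contradiction
          have : min b nbits = nbits := min_eq_right (by omega)
          rw [this] at hle
          exact absurd (hsize i hb) (by omega)
    · rintro ⟨i, hf, hbad⟩
      have hb : mask.testBit i = true := (hbit i) ▸ hf
      have hi : i < nbits := hsize i hb
      rcases hbad with hl | hr
      · -- left collision: set esquerda
        apply Bool.or_eq_true_iff.mpr; left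
        simp only [Bool.and_eq_true, decide_eq_true_eq, bne_iff_ne, ne_eq]
        refine ⟨by omega, (pvLowBits_iff mask _).mpr ⟨i, ?_, hb⟩⟩
        have : (i : Int) < -off := by omega
        omega
      · -- right collision: set direita
        apply Bool.or_eq_true_iff.mpr; right
        simp only [bne_iff_ne, ne_eq]
        apply (pvHighBits_iff mask _).mpr
        exact ⟨i, by omega, hb⟩

-- ===== VERDICT (by name: the statement is the Claim_ definition above) =====
theorem verificar_colisao_parede_spec : Claim_equal_verificar_colisao_parede := by
  intro formato pos dx _
  unfold Spec_verificar_colisao_parede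
  rw [Bool.eq_iff_iff]
  rw [show verificar_colisao_parede formato pos dx = pvARows pos.1 dx formato from rfl]
  rw [pvARows_iff, pvAlt_iff]
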